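-- pv_equiv track=rewrite | github.com/DiegoAbdiasSaldanaFuentes/Proyectos-Universidad | Primer_año/PYTHON/Listas y Tuplas/a.py | der_izq
-- ===== SOURCE A (Python) =====
-- def der_izq(tablero,palabra):
--     for linea in tablero:
--         cadena = ''
--         for letra in linea:
--             cadena = letra + cadena
--         if palabra in cadena:
--             return 'SI'
--     return 'NO'
-- ===== SOURCE B (Python) =====
-- def der_izq(tablero, palabra):
--     objetivo = palabra[::-1]
--     for linea in tablero:
--         if objetivo in ''.join(c[::-1] for c in linea):
--             return 'SI'
--     return 'NO'
-- ===== Notes on version B (the rewrite author's own statement) =====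
-- stated objective: alternative
-- what changed: B reverses the word (and each cell) once and substring-searches the lines front-to-back, where A rebuilds each line reversed by repeated string prepending before searching.
import Mathlib
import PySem

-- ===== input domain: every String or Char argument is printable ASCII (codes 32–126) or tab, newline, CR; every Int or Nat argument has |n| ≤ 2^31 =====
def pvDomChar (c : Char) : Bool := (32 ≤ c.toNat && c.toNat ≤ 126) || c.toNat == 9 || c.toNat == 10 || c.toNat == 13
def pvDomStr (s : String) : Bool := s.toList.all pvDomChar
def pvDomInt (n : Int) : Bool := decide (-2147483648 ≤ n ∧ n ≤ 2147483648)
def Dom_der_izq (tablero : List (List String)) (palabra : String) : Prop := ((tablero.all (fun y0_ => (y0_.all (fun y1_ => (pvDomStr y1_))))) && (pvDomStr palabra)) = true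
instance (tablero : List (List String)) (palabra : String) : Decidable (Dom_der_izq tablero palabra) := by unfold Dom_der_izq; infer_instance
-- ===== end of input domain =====

-- B reverses the word (and each cell) once and searches the lines front-to-back,
-- instead of A's per-line rebuild of the reversed string by repeated prepending
-- (objective: alternative; agreement proved via the substring-reversal identity).

-- ===== PORT A =====
-- A: for each line, build cadena by prepending each letra, then test 'palabra in cadena'.
def der_izq (tablero : List (List String)) (palabra : String) : String :=
  match tablero with
  | [] => "NO"
  | linea :: rest =>
    let cadena := linea.foldl (fun cadena letra => letra ++ cadena) ""
    if PySem.Str.isIn palabra cadena then "SI" else der_izq rest palabra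

-- ===== PORT B =====
-- B's loop over tablero with the precomputed reversed target 'objetivo'
def derIzqAltLoop (tablero : List (List String)) (objetivo : String) : String :=
  match tablero with
  | [] => "NO"
  | linea :: rest =>
    if PySem.Str.isIn objetivo
        (PySem.Str.join "" (linea.map (fun c => String.ofList c.toList.reverse))) then "SI"
    else derIzqAltLoop rest objetivo

def der_izq_alt (tablero : List (List String)) (palabra : String) : String :=
  derIzqAltLoop tablero (String.ofList palabra.toList.reverse)

-- ===== PRECONDITION & SPEC =====
def Spec_der_izq (tablero : List (List String)) (palabra : String) (out : String) : Prop := out = der_izq_alt tablero palabra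
instance (tablero : List (List String)) (palabra : String) (out : String) : Decidable (Spec_der_izq tablero palabra out) := by unfold Spec_der_izq; infer_instance

-- ===== CLAIM (what is proved, stated in full; the proofs are below) =====
def Claim_equal_der_izq : Prop := ∀ (tablero : List (List String)) (palabra : String), Dom_der_izq tablero palabra → Spec_der_izq tablero palabra (der_izq tablero palabra)

-- ===== LEMMAS AND PROOFS =====

-- joining with the empty separator is flatten
lemma join_nil_eq_flatten (parts : List (List Char)) :
    PySem.Chars.join [] parts = parts.flatten := by
  induction parts with
  | nil => rfl
  | cons h t ih =>
    cases t with
    | nil => rfl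
    | cons b t2 =>
      show ((h :: [] :: List.intersperse [] (b :: t2)).flatten) = _
      simp only [List.flatten_cons, List.nil_append]
      simp only [PySem.Chars.join, List.intercalate] at ih
      rw [ih]; rfl

-- A's inner prepending loop builds the concatenation of the line in reverse order
lemma foldl_prepend_toList (linea : List String) (acc : String) :
    (linea.foldl (fun cadena letra => letra ++ cadena) acc).toList
      = ((linea.map String.toList).reverse).flatten ++ acc.toList := by
  induction linea generalizing acc with
  | nil => simp
  | cons h t ih =>
    simp only [List.foldl_cons, List.map_cons, List.reverse_cons, List.flatten_append, ih]
    simp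

-- per-line identity: palabra occurs in A's reversed string iff the reversed
-- palabra occurs in the cell-wise reversed line (substring-reversal identity)
lemma line_eq (linea : List String) (palabra : String) :
    PySem.Str.isIn palabra (linea.foldl (fun cadena letra => letra ++ cadena) "")
      = PySem.Str.isIn (String.ofList palabra.toList.reverse)
          (PySem.Str.join "" (linea.map (fun c => String.ofList c.toList.reverse))) := by
  rw [Bool.eq_iff_iff]
  rw [PySem.Str.isIn_iff_infix, PySem.Str.isIn_iff_infix]
  rw [foldl_prepend_toList]
  rw [PySem.Str.toList_join]
  simp only [String.toList_ofList, List.map_map]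
  have hjoin : (PySem.Chars.join "".toList
      (List.map (String.toList ∘ fun c => String.ofList c.toList.reverse) linea))
      = (List.map (fun c => c.toList.reverse) linea).flatten := by
    have : "".toList = ([] : List Char) := rfl
    rw [this, join_nil_eq_flatten]
    congr 1
    simp [Function.comp_def]
  rw [hjoin]
  have hrev : (List.map (fun c : String => c.toList.reverse) linea).flatten
      = ((linea.map String.toList).reverse.flatten).reverse := by
    rw [List.reverse_flatten]
    rw [List.map_reverse, List.reverse_reverse, List.map_map]
    simp [Function.comp_def]
  rw [hrev]
  simp only [show ("".toList) = ([] : List Char) from rfl, List.append_nil]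
  exact (List.reverse_infix).symm

-- ===== VERDICT (by name: the statement is the Claim_ definition above) =====
lemma der_izq_eq_alt (tablero : List (List String)) (palabra : String) :
    der_izq tablero palabra = der_izq_alt tablero palabra := by
  unfold der_izq_alt
  induction tablero with
  | nil => rfl
  | cons linea rest ih =>
    simp only [der_izq, derIzqAltLoop]
    rw [line_eq]
    split
    · rfl
    · exact ih

theorem der_izq_spec : Claim_equal_der_izq :=
  fun tablero palabra _ => der_izq_eq_alt tablero palabra
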